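-- pv_equiv track=rewrite | github.com/mangekyou-network/susanoo | models/model1_price_training.py | calculate_dense_outputs
-- ===== SOURCE A (Python) =====
-- def calculate_dot_product(inputs, weights):
--     """Calculate dot product manually to match circom's computation"""
--     result = 0
--     for i in range(len(inputs)):
--         result += int(inputs[i]) * int(weights[i])
--     return result
--
-- def calculate_dense_outputs(inputs, weights, scale_factor):
--     """Calculate dense layer outputs and remainders that satisfy the constraint:
--     out[i] * n + remainder[i] === dot[i].out[0][0] + bias[i]
--     """
--     n_outputs = len(weights[0])
--     outputs = []
--     remainders = []
--
--     for i in range(n_outputs):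
--         output_weights = [row[i] for row in weights]
--         dot_product = calculate_dot_product(inputs, output_weights)
--         output = dot_product // scale_factor
--         remainder = dot_product % scale_factor
--         outputs.append(str(output))
--         remainders.append(str(remainder))
--
--     return outputs, remainders
-- ===== SOURCE B (Python) =====
-- def calculate_dense_outputs(inputs, weights, scale_factor):
--     n_outputs = len(weights[0])
--     acc = [0] * n_outputs
--     for x, row in zip(inputs, weights):
--         acc = [a + int(x) * int(w) for a, w in zip(acc, row)]
--     outputs = []
--     remainders = []
--     for a in acc:
--         q, r = divmod(a, scale_factor)
--         outputs.append(str(q))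
--         remainders.append(str(r))
--     return outputs, remainders
-- ===== Notes on version B (the rewrite author's own statement) =====
-- stated objective: alternative
-- what changed: B replaces A's per-output column extraction plus a separate dot-product helper by a single row-major pass over zip(inputs, weights) that updates one accumulator vector, then one divmod pass over the accumulators.
import Mathlib
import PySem

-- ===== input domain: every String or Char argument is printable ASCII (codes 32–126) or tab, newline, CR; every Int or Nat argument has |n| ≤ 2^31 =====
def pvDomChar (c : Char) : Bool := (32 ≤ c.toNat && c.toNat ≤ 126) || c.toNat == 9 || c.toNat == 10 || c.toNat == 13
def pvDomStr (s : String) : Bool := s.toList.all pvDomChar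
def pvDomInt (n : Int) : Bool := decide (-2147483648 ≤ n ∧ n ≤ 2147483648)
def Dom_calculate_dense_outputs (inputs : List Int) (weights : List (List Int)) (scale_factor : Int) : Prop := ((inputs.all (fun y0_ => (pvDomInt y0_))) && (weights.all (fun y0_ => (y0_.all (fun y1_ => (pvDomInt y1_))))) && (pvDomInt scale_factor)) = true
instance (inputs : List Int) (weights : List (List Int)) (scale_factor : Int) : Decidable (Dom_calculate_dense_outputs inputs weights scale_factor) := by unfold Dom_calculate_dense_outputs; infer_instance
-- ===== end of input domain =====

-- ===== PORT A =====
-- B differs from A only by structure (row-major single pass); return values proved equal on Pre_.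
def calculate_dot_product (inputs : List Int) (weights : List Int) : Int :=
  (PySem.List.pyRange 0 (inputs.length : Int) 1).foldl
    (fun result i => result + PySem.List.pyGetD inputs i 0 * PySem.List.pyGetD weights i 0) 0

def calculate_dense_outputs (inputs : List Int) (weights : List (List Int)) (scale_factor : Int) : List String × List String :=
  let n_outputs := (PySem.List.pyGetD weights 0 []).length
  (PySem.List.pyRange 0 (n_outputs : Int) 1).foldl
    (fun acc i =>
      let output_weights := weights.map (fun row => PySem.List.pyGetD row i 0)
      let dot_product := calculate_dot_product inputs output_weights
      (acc.1 ++ [PySem.Int.toStr (PySem.Int.floordiv dot_product scale_factor)],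
       acc.2 ++ [PySem.Int.toStr (PySem.Int.mod dot_product scale_factor)]))
    ([], [])

-- ===== PORT B =====
def calculate_dense_outputs_alt (inputs : List Int) (weights : List (List Int)) (scale_factor : Int) : List String × List String :=
  let n_outputs := (PySem.List.pyGetD weights 0 []).length
  let acc := (List.zip inputs weights).foldl
    (fun acc p => List.zipWith (fun a w => a + p.1 * w) acc p.2)
    (List.replicate n_outputs (0 : Int))
  acc.foldl
    (fun r a =>
      (r.1 ++ [PySem.Int.toStr (PySem.Int.floordiv a scale_factor)],
       r.2 ++ [PySem.Int.toStr (PySem.Int.mod a scale_factor)]))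
    ([], [])

-- ===== PRECONDITION & SPEC =====
-- Pre_: exactly where A returns: weights nonempty (else weights[0] raises), and either the
-- first row is empty (the loop runs zero times, A returns ([],[])) or scale_factor is nonzero,
-- len(inputs) <= len(weights) and every row has at least len(weights[0]) entries (else A raises
-- ZeroDivisionError or IndexError).
def Pre_calculate_dense_outputs (inputs : List Int) (weights : List (List Int)) (scale_factor : Int) : Prop :=
  weights ≠ [] ∧
  ((weights.headD []).length = 0 ∨
    (scale_factor ≠ 0 ∧ inputs.length ≤ weights.length ∧
      ∀ row ∈ weights, (weights.headD []).length ≤ row.length))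
instance (inputs : List Int) (weights : List (List Int)) (scale_factor : Int) : Decidable (Pre_calculate_dense_outputs inputs weights scale_factor) := by unfold Pre_calculate_dense_outputs; infer_instance

def pvWitness_calculate_dense_outputs : List Int × List (List Int) × Int := ([2, -3], [[1, 4], [5, -6]], 3)

def Spec_calculate_dense_outputs (inputs : List Int) (weights : List (List Int)) (scale_factor : Int) (out : List String × List String) : Prop := out = calculate_dense_outputs_alt inputs weights scale_factor
instance (inputs : List Int) (weights : List (List Int)) (scale_factor : Int) (out : List String × List String) : Decidable (Spec_calculate_dense_outputs inputs weights scale_factor out) := by unfold Spec_calculate_dense_outputs; infer_instance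

-- ===== CLAIM (what is proved, stated in full; the proofs are below) =====
def Claim_equal_calculate_dense_outputs : Prop := ∀ (inputs : List Int) (weights : List (List Int)) (scale_factor : Int), Dom_calculate_dense_outputs inputs weights scale_factor → Pre_calculate_dense_outputs inputs weights scale_factor → Spec_calculate_dense_outputs inputs weights scale_factor (calculate_dense_outputs inputs weights scale_factor)

-- ===== LEMMAS AND PROOFS =====
-- the column-dot value both programs compute for output j
def pvColDot (inputs : List Int) (weights : List (List Int)) (i : Int) : Int :=
  ((List.zip inputs weights).map (fun p => p.1 * PySem.List.pyGetD p.2 i 0)).sum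

lemma zipWith_map_range {n : Nat} (φ : Nat → Int) (x : Int) (row : List Int) (hrow : n ≤ row.length) :
    List.zipWith (fun a w => a + x * w) ((List.range n).map φ) row
      = (List.range n).map (fun j => φ j + x * PySem.List.pyGetD row (j : Int) 0) := by
  apply List.ext_getElem
  · simp [Nat.min_eq_left hrow]
  · intro k h1 h2
    have hk : k < n := by simpa using h2
    simp [List.getElem_zipWith, PySem.List.pyGetD_natCast, List.getD_eq_getElem?_getD,
      List.getElem?_eq_getElem (lt_of_lt_of_le hk hrow)]

lemma bside (n : Nat) :
    ∀ (L : List (Int × List Int)) (φ : Nat → Int), (∀ p ∈ L, n ≤ p.2.length) →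
      L.foldl (fun acc p => List.zipWith (fun a w => a + p.1 * w) acc p.2) ((List.range n).map φ)
        = (List.range n).map (fun j => φ j + ((L.map (fun p => p.1 * PySem.List.pyGetD p.2 (j : Int) 0)).sum)) := by
  intro L
  induction L with
  | nil => intro φ _; simp
  | cons p L ih =>
    intro φ h
    have hp : n ≤ p.2.length := h p (by simp)
    simp only [List.foldl_cons, zipWith_map_range φ p.1 p.2 hp]
    rw [ih _ (fun q hq => h q (by simp [hq]))]
    apply List.map_congr_left
    intro j _
    simp [add_assoc]

lemma aside (inputs : List Int) (weights : List (List Int)) (i : Int)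
    (hlen : inputs.length ≤ weights.length) :
    calculate_dot_product inputs (weights.map (fun row => PySem.List.pyGetD row i 0))
      = pvColDot inputs weights i := by
  unfold calculate_dot_product pvColDot
  rw [PySem.List.pyRange_zero_nat, List.foldl_map, PySem.List.foldl_add]
  rw [zero_add]
  congr 1
  apply List.ext_getElem
  · simp [Nat.min_eq_left hlen]
  · intro k h1 h2
    have hk : k < inputs.length := by simpa using h1
    have hkw : k < weights.length := lt_of_lt_of_le hk hlen
    simp [List.getElem_zip, PySem.List.pyGetD_natCast, List.getD_eq_getElem?_getD,
      List.getElem?_eq_getElem hk, List.getElem?_eq_getElem hkw]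

-- the accumulator after B's row pass is exactly the list of column dots
lemma acc_eq (inputs : List Int) (weights : List (List Int)) (n : Nat)
    (hrows : ∀ row ∈ weights, n ≤ row.length) :
    (List.zip inputs weights).foldl (fun acc p => List.zipWith (fun a w => a + p.1 * w) acc p.2)
        (List.replicate n (0 : Int))
      = (List.range n).map (fun (j : Nat) => pvColDot inputs weights (j : Int)) := by
  have h0 : (List.replicate n (0 : Int)) = (List.range n).map (fun _ => (0 : Int)) := by
    simp [List.map_const']
  rw [h0, bside n _ (fun _ => 0) ?_]
  · apply List.map_congr_left; intro j _; simp [pvColDot]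
  · intro p hp
    exact hrows p.2 (List.of_mem_zip hp).2

theorem calculate_dense_outputs_spec : Claim_equal_calculate_dense_outputs := by
  intro inputs weights scale_factor _ hpre
  obtain ⟨hne, hrest⟩ := hpre
  unfold Spec_calculate_dense_outputs calculate_dense_outputs calculate_dense_outputs_alt
  have hh : PySem.List.pyGetD weights 0 [] = weights.headD [] := by
    cases weights with
    | nil => simp at hne
    | cons w ws => simp [PySem.List.pyGetD_zero]
  set n := (weights.headD []).length with hn
  have hrows : ∀ row ∈ weights, n ≤ row.length := by
    intro row hrow
    rcases hrest with h0 | ⟨_, _, hr⟩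
    · omega
    · exact hr row hrow
  simp only [hh, ← hn]
  rw [acc_eq inputs weights n hrows]
  rw [PySem.List.pyRange_zero_nat, List.foldl_map]
  rw [PySem.List.foldl_prod_mk
    (f := fun (acc : List String) (k : Nat) => acc ++ [PySem.Int.toStr (PySem.Int.floordiv (calculate_dot_product inputs (weights.map (fun row => PySem.List.pyGetD row (k : Int) 0))) scale_factor)])
    (g := fun (acc : List String) (k : Nat) => acc ++ [PySem.Int.toStr (PySem.Int.mod (calculate_dot_product inputs (weights.map (fun row => PySem.List.pyGetD row (k : Int) 0))) scale_factor)])]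
  rw [PySem.List.foldl_prod_mk
    (f := fun (acc : List String) (a : Int) => acc ++ [PySem.Int.toStr (PySem.Int.floordiv a scale_factor)])
    (g := fun (acc : List String) (a : Int) => acc ++ [PySem.Int.toStr (PySem.Int.mod a scale_factor)])]
  rw [PySem.List.foldl_append_singleton_eq_map, PySem.List.foldl_append_singleton_eq_map,
      PySem.List.foldl_append_singleton_eq_map, PySem.List.foldl_append_singleton_eq_map]
  simp only [List.nil_append, List.map_map]
  have hdot : ∀ k ∈ List.range n,
      calculate_dot_product inputs (weights.map (fun row => PySem.List.pyGetD row (k : Int) 0))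
        = pvColDot inputs weights (k : Int) := by
    intro k hk
    have hnpos : n ≠ 0 := by
      intro h; rw [h] at hk; simp at hk
    rcases hrest with h0 | ⟨_, hlen, _⟩
    · omega
    · exact aside inputs weights _ hlen
  congr 1
  · apply List.map_congr_left; intro k hk; simp only [Function.comp_apply, hdot k hk]
  · apply List.map_congr_left; intro k hk; simp only [Function.comp_apply, hdot k hk]
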